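-- pv_equiv track=rewrite | github.com/StevenXoFk/Tarea-taller-Tkinter | convertidor.py | base8_a_base11
-- ===== SOURCE A (Python) =====
-- def base8_a_base11(numero):
--     res = 0
--     exponentee = 0
--     base11 = ""
--
--
--     diles = "0123456789ABCDEF"
--
--     while numero > 0:
--         nuevo = numero % 10
--         res += nuevo * (8 ** exponentee)
--         numero //= 10
--         exponentee += 1
--
--     while res > 0:
--         todo = res % 11
--         base11 = diles[todo] + base11
--         res //= 11
--
--     return base11
-- ===== SOURCE B (Python) =====
-- def base8_a_base11(numero):
--     def horner(n):                      # MSB-first Horner over decimal digits (read as base-8)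
--         if n <= 0:
--             return 0
--         return horner(n // 10) * 8 + n % 10
--
--     def to11(r):                        # base-11 rendering, built front-to-back by recursion
--         if r <= 0:
--             return ""
--         return to11(r // 11) + "0123456789ABCDEF"[r % 11]
--
--     return to11(horner(numero))
-- ===== Notes on version B (the rewrite author's own statement) =====
-- stated objective: simpler
-- what changed: Replaces A's two accumulator while-loops (LSB-first with an explicit 8**exponent variable, and a prepend-accumulator for base 11) by two plain recursions: an MSB-first Horner recursion with no exponent variable, and a base-11 recursion that appends the last digit, with no accumulators at all.
import Mathlib
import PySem

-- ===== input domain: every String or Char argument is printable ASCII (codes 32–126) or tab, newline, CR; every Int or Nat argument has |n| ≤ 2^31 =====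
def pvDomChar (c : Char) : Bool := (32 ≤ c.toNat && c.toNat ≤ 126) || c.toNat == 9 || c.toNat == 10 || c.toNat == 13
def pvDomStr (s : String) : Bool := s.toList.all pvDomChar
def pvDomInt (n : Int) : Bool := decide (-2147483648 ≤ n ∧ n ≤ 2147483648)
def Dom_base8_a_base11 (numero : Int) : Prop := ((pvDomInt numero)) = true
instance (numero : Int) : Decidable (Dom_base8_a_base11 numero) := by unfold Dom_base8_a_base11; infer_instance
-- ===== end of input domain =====

-- B replaces A's two accumulator loops (LSB-first with an 8**exponent variable; prepend
-- accumulator) by two accumulator-free recursions (MSB-first Horner; append last digit):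
-- a simpler decomposition, same result.

-- termination helper cited by the ports' decreasing_by
theorem pvDivLt10 (n : Int) (hn : 0 < n) : (PySem.Int.floordiv n 10).toNat < n.toNat := by
  rw [PySem.Int.floordiv_eq_ediv_of_pos (by omega)]; omega

theorem pvDivLt11 (n : Int) (hn : 0 < n) : (PySem.Int.floordiv n 11).toNat < n.toNat := by
  rw [PySem.Int.floordiv_eq_ediv_of_pos (by omega)]; omega

-- ===== PORT A =====
-- first while loop; exponentee is always ≥ 0 in Python, carried as a Nat so 8 ** exponentee is defined
def pvALoop1 (numero res : Int) (exponentee : Nat) : Int :=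
  if numero > 0 then
    pvALoop1 (PySem.Int.floordiv numero 10)
      (res + (PySem.Int.mod numero 10) * 8 ^ exponentee) (exponentee + 1)
  else res
termination_by numero.toNat
decreasing_by exact pvDivLt10 _ (by omega)

-- second while loop; diles[todo] always hits (0 ≤ todo = res % 11 < 11 < 16), so .getD on the
-- pyGet? result is exact here
def pvALoop2 (res : Int) (base11 : String) : String :=
  if res > 0 then
    pvALoop2 (PySem.Int.floordiv res 11)
      (((PySem.Str.pyGet? "0123456789ABCDEF" (PySem.Int.mod res 11)).getD ' ').toString ++ base11)
  else base11
termination_by res.toNat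
decreasing_by exact pvDivLt11 _ (by omega)

def base8_a_base11 (numero : Int) : String :=
  pvALoop2 (pvALoop1 numero 0 0) ""

-- ===== PORT B =====
-- MSB-first Horner over the decimal digits, read as base-8 digits
def pvHorner (n : Int) : Int :=
  if n ≤ 0 then 0
  else pvHorner (PySem.Int.floordiv n 10) * 8 + PySem.Int.mod n 10
termination_by n.toNat
decreasing_by exact pvDivLt10 _ (by omega)

-- base-11 rendering, built front-to-back by recursion (index always in range, as above)
def pvTo11 (r : Int) : String :=
  if r ≤ 0 then ""
  else pvTo11 (PySem.Int.floordiv r 11) ++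
    ((PySem.Str.pyGet? "0123456789ABCDEF" (PySem.Int.mod r 11)).getD ' ').toString
termination_by r.toNat
decreasing_by exact pvDivLt11 _ (by omega)

def base8_a_base11_alt (numero : Int) : String :=
  pvTo11 (pvHorner numero)

-- ===== PRECONDITION & SPEC =====
def Spec_base8_a_base11 (numero : Int) (out : String) : Prop := out = base8_a_base11_alt numero
instance (numero : Int) (out : String) : Decidable (Spec_base8_a_base11 numero out) := by unfold Spec_base8_a_base11; infer_instance

-- ===== CLAIM (what is proved, stated in full; the proofs are below) =====
def Claim_equal_base8_a_base11 : Prop := ∀ (numero : Int), Dom_base8_a_base11 numero → Spec_base8_a_base11 numero (base8_a_base11 numero)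

-- ===== LEMMAS AND PROOFS =====

theorem pvLoop1_eq_horner (n : Int) : ∀ (r : Int) (e : Nat),
    pvALoop1 n r e = r + 8 ^ e * pvHorner n := by
  induction n using pvHorner.induct with
  | case1 n hn =>
    intro r e
    rw [pvALoop1, pvHorner]
    simp only [if_pos hn, if_neg (by omega : ¬ n > 0)]
    ring
  | case2 n hn ih =>
    intro r e
    rw [pvALoop1, pvHorner]
    simp only [if_pos (by omega : n > 0), if_neg hn, ih]
    ring

theorem pvLoop2_eq_to11 (r : Int) : ∀ (acc : String),
    pvALoop2 r acc = pvTo11 r ++ acc := by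
  induction r using pvTo11.induct with
  | case1 r hr =>
    intro acc
    rw [pvALoop2, pvTo11]
    simp [if_neg (by omega : ¬ r > 0), if_pos hr]
  | case2 r hr ih =>
    intro acc
    rw [pvALoop2, pvTo11]
    simp only [if_pos (by omega : r > 0), if_neg hr, ih]
    rw [String.append_assoc]

-- ===== VERDICT (by name: the statement is the Claim_ definition above) =====
theorem base8_a_base11_spec : Claim_equal_base8_a_base11 := by
  intro numero _
  unfold Spec_base8_a_base11 base8_a_base11 base8_a_base11_alt
  rw [pvLoop1_eq_horner, pvLoop2_eq_to11]
  simp
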